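-- pv_equiv track=rewrite | github.com/longkid8923/python_practice | week_02/homework/02_is_available_to_order.py | is_available_to_order
-- ===== SOURCE A (Python) =====
-- def is_in(target, lst):
--     lst = sorted(lst)
--     current_min = 0
--     current_max = len(lst) - 1
--     current_guess = (current_min + current_max) // 2
--
--     while current_min <= current_max:
--         if lst[current_guess] == target:
--             return True
--         elif lst[current_guess] > target:
--             current_max = current_guess - 1
--         else:
--             current_min = current_guess + 1
--         current_guess = (current_min + current_max) // 2
--
--     return False
--
-- def is_available_to_order(menus, orders):
--     true_lst = []
--     for o in orders:
--         if is_in(o, menus):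
--             true_lst.append(o)
--     if len(true_lst) == len(orders):
--         return True
--
--     return False
-- ===== SOURCE B (Python) =====
-- def is_available_to_order(menus, orders):
--     menu_set = set(menus)
--     return all(o in menu_set for o in orders)
-- ===== Notes on version B (the rewrite author's own statement) =====
-- stated objective: faster
-- what changed: Replaces the per-order sort-plus-binary-search with one hash set built once from menus and a single membership pass over orders.
import Mathlib
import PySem

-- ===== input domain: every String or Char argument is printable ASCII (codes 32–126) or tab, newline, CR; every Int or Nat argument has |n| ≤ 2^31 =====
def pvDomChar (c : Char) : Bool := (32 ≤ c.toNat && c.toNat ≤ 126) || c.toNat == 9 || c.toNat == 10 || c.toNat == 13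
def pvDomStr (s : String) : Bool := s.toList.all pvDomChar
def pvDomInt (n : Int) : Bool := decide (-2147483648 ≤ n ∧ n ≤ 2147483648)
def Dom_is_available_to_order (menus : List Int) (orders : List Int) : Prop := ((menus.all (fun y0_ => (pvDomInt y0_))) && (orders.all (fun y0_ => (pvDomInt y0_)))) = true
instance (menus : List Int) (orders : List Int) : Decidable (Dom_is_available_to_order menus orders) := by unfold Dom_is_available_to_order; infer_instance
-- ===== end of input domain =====

-- B replaces A's per-order sort + hand-written binary search with a set built once and one membership pass (faster).


-- ===== PORT A =====
-- the while-loop of is_in: state (current_min, current_max); guess is recomputed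
-- at the head of each iteration as (min+max)//2, exactly as Python does.
-- (the 'none' indexing branch is unreachable for the arguments is_in passes)
def pyIsInLoop (target : Int) (lst : List Int) (lo hi : Int) : Bool :=
  if _h : lo ≤ hi then
    let guess := PySem.Int.floordiv (lo + hi) 2
    match PySem.List.pyGet? lst guess with
    | some v =>
      if v == target then true
      else if v > target then pyIsInLoop target lst lo (guess - 1)
      else pyIsInLoop target lst (guess + 1) hi
    | none => false
  else false
termination_by (hi + 1 - lo).toNat
decreasing_by
  · have := PySem.Int.floordiv_two_mid_bounds _h
    omega
  · have := PySem.Int.floordiv_two_mid_bounds _h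
    omega

def is_in (target : Int) (lst : List Int) : Bool :=
  let lst' := PySem.List.sorted lst (fun x => x) false
  pyIsInLoop target lst' 0 ((lst'.length : Int) - 1)

def is_available_to_order (menus : List Int) (orders : List Int) : Bool :=
  let true_lst := orders.foldl (fun acc o => if is_in o menus then acc ++ [o] else acc) ([] : List Int)
  if true_lst.length == orders.length then true else false

-- ===== PORT B =====
def is_available_to_order_alt (menus : List Int) (orders : List Int) : Bool :=
  let menu_set := PySem.Set.ofList menus
  orders.all (fun o => PySem.Set.contains menu_set o)

-- ===== PRECONDITION & SPEC =====
def Spec_is_available_to_order (menus : List Int) (orders : List Int) (out : Bool) : Prop := out = is_available_to_order_alt menus orders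
instance (menus : List Int) (orders : List Int) (out : Bool) : Decidable (Spec_is_available_to_order menus orders out) := by unfold Spec_is_available_to_order; infer_instance

-- ===== CLAIM (what is proved, stated in full; the proofs are below) =====
def Claim_equal_is_available_to_order : Prop := ∀ (menus : List Int) (orders : List Int), Dom_is_available_to_order menus orders → Spec_is_available_to_order menus orders (is_available_to_order menus orders)

-- ===== LEMMAS AND PROOFS =====

-- binary search on a ≤-sorted list finds exactly the targets present in lst[lo..hi]
theorem pyIsInLoop_iff (target : Int) (lst : List Int)
    (hs : lst.Pairwise (· ≤ ·)) :
    ∀ (n : Nat) (lo hi : Int), (hi + 1 - lo).toNat ≤ n → 0 ≤ lo → hi < (lst.length : Int) →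
    (pyIsInLoop target lst lo hi = true ↔
      ∃ i : Nat, ∃ h : i < lst.length, lo ≤ (i : Int) ∧ (i : Int) ≤ hi ∧ lst[i]'h = target) := by
  have mono : ∀ (p q : Nat) (hp : p < lst.length) (hq : q < lst.length), p ≤ q →
      lst[p]'hp ≤ lst[q]'hq := by
    intro p q hp hq h
    rcases Nat.lt_or_ge p q with h' | h'
    · exact List.pairwise_iff_getElem.mp hs p q hp hq h'
    · have : p = q := by omega
      subst this; rfl
  intro n
  induction n with
  | zero =>
    intro lo hi hn h0 hlen
    have hle : ¬ lo ≤ hi := by omega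
    rw [pyIsInLoop, dif_neg hle]
    constructor
    · intro h; cases h
    · rintro ⟨i, hi', h1, h2, _⟩; omega
  | succ n ih =>
    intro lo hi hn h0 hlen
    by_cases hle : lo ≤ hi
    · have hmid := PySem.Int.floordiv_two_mid_bounds hle
      have hg0 : 0 ≤ PySem.Int.floordiv (lo + hi) 2 := by omega
      have hglt : PySem.Int.floordiv (lo + hi) 2 < (lst.length : Int) := by omega
      have hgn : (PySem.Int.floordiv (lo + hi) 2).toNat < lst.length := by omega
      have hget : PySem.List.pyGet? lst (PySem.Int.floordiv (lo + hi) 2)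
          = some (lst[(PySem.Int.floordiv (lo + hi) 2).toNat]'hgn) :=
        PySem.List.pyGet?_eq_some_getElem lst hg0 hglt
      rw [pyIsInLoop, dif_pos hle]
      simp only [hget]
      set g := PySem.Int.floordiv (lo + hi) 2 with hgdef
      by_cases heq : lst[g.toNat]'hgn = target
      · rw [if_pos (beq_iff_eq.mpr heq)]
        simp only [true_iff]
        exact ⟨g.toNat, hgn, by omega, by omega, heq⟩
      · rw [if_neg (by simp only [beq_iff_eq]; exact heq)]
        by_cases hgt : lst[g.toNat]'hgn > target
        · rw [if_pos hgt]
          rw [ih lo (g - 1) (by omega) h0 (by omega)]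
          constructor
          · rintro ⟨i, hi', h1, h2, h3⟩
            exact ⟨i, hi', h1, by omega, h3⟩
          · rintro ⟨i, hi', h1, h2, h3⟩
            refine ⟨i, hi', h1, ?_, h3⟩
            by_contra hbad
            have hgi : g.toNat ≤ i := by omega
            have := mono g.toNat i hgn hi' hgi
            omega
        · rw [if_neg hgt]
          rw [ih (g + 1) hi (by omega) (by omega) hlen]
          constructor
          · rintro ⟨i, hi', h1, h2, h3⟩
            exact ⟨i, hi', by omega, h2, h3⟩
          · rintro ⟨i, hi', h1, h2, h3⟩
            refine ⟨i, hi', ?_, h2, h3⟩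
            by_contra hbad
            have hgi : i ≤ g.toNat := by omega
            have := mono i g.toNat hi' hgn hgi
            omega
    · rw [pyIsInLoop, dif_neg hle]
      constructor
      · intro h; cases h
      · rintro ⟨i, hi', h1, h2, _⟩; omega

theorem is_in_iff (target : Int) (lst : List Int) :
    is_in target lst = true ↔ target ∈ lst := by
  unfold is_in
  have hs : (PySem.List.sorted lst (fun x => x) false).Pairwise (· ≤ ·) := by
    have := PySem.List.sorted_pairwise lst (fun x => x)
    simpa using this
  set s := PySem.List.sorted lst (fun x => x) false with hsdef
  have hmem : target ∈ s ↔ target ∈ lst := PySem.List.mem_sorted lst (fun x => x) false target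
  rw [pyIsInLoop_iff target s hs s.length 0 ((s.length : Int) - 1) (by omega) le_rfl (by omega)]
  rw [← hmem]
  constructor
  · rintro ⟨i, hi', _, _, h3⟩
    exact h3 ▸ List.getElem_mem hi'
  · intro hmem'
    rcases List.mem_iff_getElem.mp hmem' with ⟨i, hi', h⟩
    exact ⟨i, hi', by omega, by omega, h⟩

-- the if-append loop of A is a filter; its length equals orders' length iff every order passes
theorem is_available_eq (menus : List Int) (orders : List Int) :
    is_available_to_order menus orders = is_available_to_order_alt menus orders := by
  unfold is_available_to_order is_available_to_order_alt
  rw [PySem.List.foldl_append_if_eq_filter]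
  have hpq : ∀ o ∈ orders, is_in o menus = PySem.Set.contains (PySem.Set.ofList menus) o := by
    intro o _
    rw [Bool.eq_iff_iff, is_in_iff, PySem.Set.contains_iff, PySem.Set.mem_ofList]
  rw [List.filter_congr hpq]
  simp only [List.nil_append]
  by_cases hall : orders.all (fun o => PySem.Set.contains (PySem.Set.ofList menus) o) = true
  · rw [hall]
    have : (orders.filter (fun o => PySem.Set.contains (PySem.Set.ofList menus) o)).length = orders.length :=
      List.length_filter_eq_length_iff.mpr (List.all_eq_true.mp hall)
    simp [this]
  · rw [Bool.not_eq_true] at hall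
    rw [hall]
    have : (orders.filter (fun o => PySem.Set.contains (PySem.Set.ofList menus) o)).length ≠ orders.length := by
      intro h
      have := List.all_eq_true.mpr (List.length_filter_eq_length_iff.mp h)
      rw [hall] at this
      exact Bool.false_ne_true this
    simp [this]

-- ===== VERDICT (by name: the statement is the Claim_ definition above) =====
theorem is_available_to_order_spec : Claim_equal_is_available_to_order := by
  intro menus orders _
  unfold Spec_is_available_to_order
  exact is_available_eq menus orders
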